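-- pv_equiv track=rewrite | github.com/tcb0/rollup-diff-compression | new/compression_poc.py | get_stats_for_reusing_groups_all_data
-- ===== SOURCE A (Python) =====
-- from typing import List, Dict, Union, Tuple
--
-- BITS_USER_ID = 17
--
-- BITS_PERMUTATION = 1
--
-- GAS_COST_BIT = 7
--
-- def get_stats_for_reusing_groups_all_data(txs: List[List[dict]], permutations: Dict[str, int],
--                                           repeated_users: List[str]) -> Tuple[List[int], List[int], List[int]]:
--     savings = [0] * (len(txs) + 1)
--     costs_of_permutations = [0] * (len(txs) + 1)
--     num_repeated_users_per_group = [0] * (len(txs) + 1)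
--     for permutation_key, repeated_user_per_group in permutations.items():
--
--         # back to list format
--         perm_key_str = permutation_key[1:-1].split(",")
--         perm_key_list = [int(x) for x in perm_key_str]
--
--         source = 0
--
--         for i, x in enumerate(perm_key_list):
--
--             # find the group to permute
--             if source != 0:
--                 if x == 0:
--                     continue
--                 else:
--
--                     # calculate how much the permute costs
--                     cost_of_permutation = source * GAS_COST_BIT * BITS_PERMUTATION
--
--                     savings[i] += (repeated_user_per_group * GAS_COST_BIT * BITS_USER_ID) - cost_of_permutation
--                     costs_of_permutations[i] += cost_of_permutation
--                     num_repeated_users_per_group[i] += repeated_user_per_group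
--
--                     source = len(txs[i])
--             if x != 0:
--                 source = len(txs[i])
--
--     return savings, costs_of_permutations, num_repeated_users_per_group
-- ===== SOURCE B (Python) =====
-- from typing import List, Dict, Tuple
--
-- BITS_USER_ID = 17
-- BITS_PERMUTATION = 1
-- GAS_COST_BIT = 7
--
-- def get_stats_for_reusing_groups_all_data(txs: List[List[dict]], permutations: Dict[str, int],
--                                           repeated_users: List[str]) -> Tuple[List[int], List[int], List[int]]:
--     # pass 1: flatten all permutations into one event stream; one event
--     # (index, group_size, repeats) per chargeable permute
--     events = []
--     for key, r in permutations.items():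
--         vals = [int(x) for x in key[1:-1].split(",")]
--         nz = [i for i, x in enumerate(vals) if x != 0]
--         events.extend((cur, len(txs[prev]), r)
--                       for prev, cur in zip(nz, nz[1:]) if len(txs[prev]) != 0)
--     # pass 2: aggregate only the two primitive quantities per index
--     n = len(txs) + 1
--     src = [0] * n
--     rep = [0] * n
--     for i, s, r in events:
--         src[i] += s
--         rep[i] += r
--     # pass 3: derive the three outputs arithmetically from the primitives
--     costs = [GAS_COST_BIT * BITS_PERMUTATION * s for s in src]
--     savings = [GAS_COST_BIT * BITS_USER_ID * t - c for t, c in zip(rep, costs)]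
--     return savings, costs, rep
-- ===== Notes on version B (the rewrite author's own statement) =====
-- stated objective: alternative
-- what changed: Instead of A's single state machine that mutates three result arrays in place while scanning each key, B first flattens all permutations into one event stream of (index, group_size, repeats) triples, then aggregates only the two primitive quantities (source sums and repeat counts) per index, and finally derives all three output lists arithmetically (costs = 7*src, savings = 119*rep - costs), exploiting that savings and costs are linear functions of those primitives.
import Mathlib
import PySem

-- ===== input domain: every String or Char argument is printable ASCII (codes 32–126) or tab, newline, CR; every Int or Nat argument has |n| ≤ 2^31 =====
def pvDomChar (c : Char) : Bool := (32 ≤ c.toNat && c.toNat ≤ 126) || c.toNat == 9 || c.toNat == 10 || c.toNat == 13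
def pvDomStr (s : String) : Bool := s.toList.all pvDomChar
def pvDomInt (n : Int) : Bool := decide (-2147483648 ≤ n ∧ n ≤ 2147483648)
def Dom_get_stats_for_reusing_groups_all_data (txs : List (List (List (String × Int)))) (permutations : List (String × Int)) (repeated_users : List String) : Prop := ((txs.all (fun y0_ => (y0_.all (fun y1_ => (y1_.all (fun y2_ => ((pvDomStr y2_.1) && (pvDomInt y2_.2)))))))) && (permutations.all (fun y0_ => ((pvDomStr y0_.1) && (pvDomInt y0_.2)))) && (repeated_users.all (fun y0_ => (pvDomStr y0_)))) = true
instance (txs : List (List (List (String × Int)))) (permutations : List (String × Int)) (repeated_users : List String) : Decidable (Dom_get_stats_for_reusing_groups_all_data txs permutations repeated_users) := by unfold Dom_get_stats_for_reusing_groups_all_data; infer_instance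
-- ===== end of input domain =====

-- B replaces A's three-array state machine by three staged passes: flatten all permutations
-- into one event stream, aggregate two primitive per-index sums, and derive the three output
-- lists arithmetically from them (objective: alternative).

-- shared module constants and the (identical in both programs) key parsing
def pvBITS_USER_ID : Int := 17
def pvBITS_PERMUTATION : Int := 1
def pvGAS_COST_BIT : Int := 7

-- key[1:-1].split(",")
def pvFields (k : String) : List (List Char) :=
  PySem.Chars.splitOn (PySem.Chars.slice k.toList (some 1) (some (-1))) [',']

-- [int(x) for x in key[1:-1].split(",")]; total form of int(x): Pre_ requires every field to parse
def pvVals (k : String) : List Int :=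
  (pvFields k).map (fun cs => (PySem.Int.ofChars? cs).getD 0)

-- ===== PORT A =====
-- len(txs[i]); Pre_ keeps the index in range (Python raises IndexError otherwise)
def pvLenTx (txs : List (List (List (String × Int)))) (i : Int) : Int :=
  ((PySem.List.pyGetD txs i []).length : Int)

-- the three 'xs[i] += v' updates of A's loop body
def pvAdd3 (acc : List Int × List Int × List Int) (i : Int) (v cost : Int) :
    List Int × List Int × List Int :=
  (PySem.List.pySetD acc.1 i (PySem.List.pyGetD acc.1 i 0 + (v * pvGAS_COST_BIT * pvBITS_USER_ID - cost)),
   PySem.List.pySetD acc.2.1 i (PySem.List.pyGetD acc.2.1 i 0 + cost),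
   PySem.List.pySetD acc.2.2 i (PySem.List.pyGetD acc.2.2 i 0 + v))

-- one iteration of A's inner loop; state = (source, (savings, costs_of_permutations, num_repeated_users_per_group))
def pvStepA (txs : List (List (List (String × Int)))) (v : Int)
    (st : Int × (List Int × List Int × List Int)) (p : Int × Int) :
    Int × (List Int × List Int × List Int) :=
  if st.1 ≠ 0 ∧ p.2 = 0 then st  -- 'continue'
  else
    let st1 := if st.1 ≠ 0 then
        (pvLenTx txs p.1, pvAdd3 st.2 p.1 v (st.1 * pvGAS_COST_BIT * pvBITS_PERMUTATION))
      else st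
    if p.2 ≠ 0 then (pvLenTx txs p.1, st1.2) else st1

def get_stats_for_reusing_groups_all_data (txs : List (List (List (String × Int)))) (permutations : List (String × Int)) (repeated_users : List String) : List Int × List Int × List Int :=
  let n := txs.length + 1
  permutations.foldl
    (fun acc kv =>
      ((PySem.List.enumerate (pvVals kv.1) 0).foldl (pvStepA txs kv.2) (0, acc)).2)
    (List.replicate n 0, List.replicate n 0, List.replicate n 0)

-- ===== PORT B =====
-- nz = [i for i, x in enumerate(vals) if x != 0]
def pvNz (vals : List Int) : List Int :=
  (PySem.List.enumerate vals 0).foldl (fun acc p => if p.2 ≠ 0 then acc ++ [p.1] else acc) []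

-- pass-1 events of one key: (cur, len(txs[prev]), r) for consecutive non-zero pairs with non-empty source group
def pvEventsOfKey (txs : List (List (List (String × Int)))) (k : String) (r : Int) :
    List (Int × Int × Int) :=
  let nz := pvNz (pvVals k)
  ((nz.zip (PySem.List.slice nz (some 1) none)).filter
      (fun pc => decide (pvLenTx txs pc.1 ≠ 0))).map
    (fun pc => (pc.2, pvLenTx txs pc.1, r))

-- pass-2 update: src[i] += s; rep[i] += r
def pvUpd (st : List Int × List Int) (e : Int × Int × Int) : List Int × List Int :=
  (PySem.List.pySetD st.1 e.1 (PySem.List.pyGetD st.1 e.1 0 + e.2.1),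
   PySem.List.pySetD st.2 e.1 (PySem.List.pyGetD st.2 e.1 0 + e.2.2))

def get_stats_for_reusing_groups_all_data_alt (txs : List (List (List (String × Int)))) (permutations : List (String × Int)) (repeated_users : List String) : List Int × List Int × List Int :=
  let events := permutations.foldl (fun acc kv => acc ++ pvEventsOfKey txs kv.1 kv.2) []
  let n := txs.length + 1
  let st := events.foldl pvUpd (List.replicate n 0, List.replicate n 0)
  let costs := st.1.map (fun s => pvGAS_COST_BIT * pvBITS_PERMUTATION * s)
  let savings := (st.2.zip costs).map (fun p => pvGAS_COST_BIT * pvBITS_USER_ID * p.1 - p.2)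
  (savings, costs, st.2)

-- ===== PRECONDITION & SPEC =====
-- Pre_ excludes exactly the inputs where A raises: a key field that int() rejects (ValueError),
-- or a non-zero value at a position ≥ len(txs) (IndexError on txs[i]).
def Pre_get_stats_for_reusing_groups_all_data (txs : List (List (List (String × Int)))) (permutations : List (String × Int)) (repeated_users : List String) : Prop :=
  ∀ kv ∈ permutations,
    (∀ cs ∈ pvFields kv.1, (PySem.Int.ofChars? cs).isSome = true) ∧
    (∀ j : Nat, j < (pvVals kv.1).length → (pvVals kv.1).getD j 0 ≠ 0 → j < txs.length)
instance (txs : List (List (List (String × Int)))) (permutations : List (String × Int)) (repeated_users : List String) : Decidable (Pre_get_stats_for_reusing_groups_all_data txs permutations repeated_users) := by unfold Pre_get_stats_for_reusing_groups_all_data; infer_instance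

def pvWitness_get_stats_for_reusing_groups_all_data : (List (List (List (String × Int)))) × (List (String × Int)) × List String :=
  ([[[("a", 1)]], [[("b", 2)]]], [("(1,1)", 2)], [])

def Spec_get_stats_for_reusing_groups_all_data (txs : List (List (List (String × Int)))) (permutations : List (String × Int)) (repeated_users : List String) (out : List Int × List Int × List Int) : Prop := out = get_stats_for_reusing_groups_all_data_alt txs permutations repeated_users
instance (txs : List (List (List (String × Int)))) (permutations : List (String × Int)) (repeated_users : List String) (out : List Int × List Int × List Int) : Decidable (Spec_get_stats_for_reusing_groups_all_data txs permutations repeated_users out) := by unfold Spec_get_stats_for_reusing_groups_all_data; infer_instance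

-- ===== CLAIM (what is proved, stated in full; the proofs are below) =====
def Claim_equal_get_stats_for_reusing_groups_all_data : Prop := ∀ (txs : List (List (List (String × Int)))) (permutations : List (String × Int)) (repeated_users : List String), Dom_get_stats_for_reusing_groups_all_data txs permutations repeated_users → Pre_get_stats_for_reusing_groups_all_data txs permutations repeated_users → Spec_get_stats_for_reusing_groups_all_data txs permutations repeated_users (get_stats_for_reusing_groups_all_data txs permutations repeated_users)

-- ===== LEMMAS AND PROOFS =====

-- deriving the three output lists from the two primitive arrays (src, rep)
def pvDerive (st : List Int × List Int) : List Int × List Int × List Int :=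
  ((st.2.zip (st.1.map (fun s => pvGAS_COST_BIT * pvBITS_PERMUTATION * s))).map
      (fun p => pvGAS_COST_BIT * pvBITS_USER_ID * p.1 - p.2),
   st.1.map (fun s => pvGAS_COST_BIT * pvBITS_PERMUTATION * s),
   st.2)

-- proof-only reformulation of A's inner loop: fold over the non-zero positions carrying 'source'
def pvPair (txs : List (List (List (String × Int)))) (v : Int) :
    List Int → Int → (List Int × List Int × List Int) → (List Int × List Int × List Int)
  | [], _, acc => acc
  | i :: ns, s, acc =>
      pvPair txs v ns (pvLenTx txs i)
        (if s ≠ 0 then pvAdd3 acc i v (s * pvGAS_COST_BIT * pvBITS_PERMUTATION) else acc)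

-- A's accumulation on a (prev, cur) pair
def pvListStep (txs : List (List (List (String × Int)))) (v : Int)
    (acc : List Int × List Int × List Int) (pc : Int × Int) : List Int × List Int × List Int :=
  if pvLenTx txs pc.1 ≠ 0 then
    pvAdd3 acc pc.2 v (pvLenTx txs pc.1 * pvGAS_COST_BIT * pvBITS_PERMUTATION)
  else acc

-- A's step is the identity on a zero key entry
theorem pvStepA_zero (txs : List (List (List (String × Int)))) (v : Int)
    (st : Int × (List Int × List Int × List Int)) (p : Int × Int) (hp : p.2 = 0) :
    pvStepA txs v st p = st := by
  by_cases hs : st.1 = 0 <;> simp [pvStepA, hp, hs]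

-- A's step on a non-zero key entry
theorem pvStepA_nonzero (txs : List (List (List (String × Int)))) (v : Int)
    (s : Int) (acc : List Int × List Int × List Int) (p : Int × Int) (hp : p.2 ≠ 0) :
    pvStepA txs v (s, acc) p =
      (pvLenTx txs p.1,
       if s ≠ 0 then pvAdd3 acc p.1 v (s * pvGAS_COST_BIT * pvBITS_PERMUTATION) else acc) := by
  by_cases hs : s = 0 <;> simp [pvStepA, hp, hs]

-- A's inner loop is the source-carrying fold over the non-zero positions
theorem pvA_loop (txs : List (List (List (String × Int)))) (v : Int) :
    ∀ (l : List (Int × Int)) (s : Int) (acc : List Int × List Int × List Int),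
      (l.foldl (pvStepA txs v) (s, acc)).2 =
        pvPair txs v ((l.filter (fun p => decide (p.2 ≠ 0))).map (·.1)) s acc := by
  intro l
  induction l with
  | nil => intro s acc; rfl
  | cons p l ih =>
    intro s acc
    by_cases hp : p.2 = 0
    · simp only [List.foldl_cons, pvStepA_zero txs v _ p hp,
        List.filter_cons_of_neg (p := fun q : Int × Int => decide (q.2 ≠ 0)) (a := p) (l := l) (by simp [hp])]
      exact ih s acc
    · simp only [List.foldl_cons, pvStepA_nonzero txs v s acc p hp,
        List.filter_cons_of_pos (p := fun q : Int × Int => decide (q.2 ≠ 0)) (a := p) (l := l) (by simpa using hp),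
        List.map_cons, pvPair]
      exact ih _ _

-- the source-carrying fold is the fold over consecutive pairs
theorem pvPair_zip (txs : List (List (List (String × Int)))) (v : Int) :
    ∀ (ns : List Int) (p : Int) (acc : List Int × List Int × List Int),
      pvPair txs v ns (pvLenTx txs p) acc =
        ((p :: ns).zip ns).foldl (pvListStep txs v) acc := by
  intro ns
  induction ns with
  | nil => intro p acc; rfl
  | cons n ns ih =>
    intro p acc
    simp only [pvPair, List.zip_cons_cons, List.foldl_cons]
    rw [ih n]
    rfl

theorem pvPair_zero (txs : List (List (List (String × Int)))) (v : Int)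
    (ns : List Int) (acc : List Int × List Int × List Int) :
    pvPair txs v ns 0 acc = (ns.zip ns.tail).foldl (pvListStep txs v) acc := by
  cases ns with
  | nil => rfl
  | cons n ns =>
    simp only [pvPair, List.tail_cons]
    rw [if_neg (fun h => h rfl)]
    exact pvPair_zip txs v ns n acc

-- B's comprehension: the non-zero positions of the enumerated values
theorem pvNz_eq (vals : List Int) :
    pvNz vals =
      ((PySem.List.enumerate vals 0).filter (fun p => decide (p.2 ≠ 0))).map (·.1) := by
  unfold pvNz
  rw [PySem.List.foldl_append_ite (fun p : Int × Int => p.2 ≠ 0) (·.1)]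
  simp

-- elements of pvNz are in-range indices, given the Pre_ bound
theorem pvNz_bound (txs : List (List (List (String × Int)))) (vals : List Int)
    (h : ∀ j : Nat, j < vals.length → vals.getD j 0 ≠ 0 → j < txs.length) :
    ∀ c ∈ pvNz vals, 0 ≤ c ∧ c.toNat < txs.length + 1 := by
  intro c hc
  rw [pvNz_eq] at hc
  obtain ⟨p, hpmem, rfl⟩ := List.mem_map.mp hc
  obtain ⟨hpe, hpnz⟩ := List.mem_filter.mp hpmem
  obtain ⟨k, hk, rfl⟩ := (PySem.List.mem_enumerate_iff vals 0 p).mp hpe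
  have hnz : vals[k] ≠ 0 := by simpa using hpnz
  have := h k hk (by rwa [List.getD_eq_getElem _ _ hk])
  constructor
  · simp
  · simp only [zero_add, Int.toNat_natCast]
    omega

-- lengths are preserved by the pass-2 update
theorem pvUpd_length (st : List Int × List Int) (e : Int × Int × Int) :
    (pvUpd st e).1.length = st.1.length ∧ (pvUpd st e).2.length = st.2.length := by
  unfold pvUpd
  constructor <;> simp [PySem.List.length_pySetD]

-- A's single accumulation commutes with pvDerive (at an in-range index)
theorem pvAdd3_derive (st : List Int × List Int) (n : Nat)
    (h1 : st.1.length = n) (h2 : st.2.length = n)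
    (i : Int) (hi0 : 0 ≤ i) (hin : i.toNat < n) (s v : Int) :
    pvAdd3 (pvDerive st) i v (s * pvGAS_COST_BIT * pvBITS_PERMUTATION) =
      pvDerive (pvUpd st (i, s, v)) := by
  obtain ⟨k, rfl⟩ : ∃ k : Nat, i = (k : Int) := ⟨i.toNat, (Int.toNat_of_nonneg hi0).symm⟩
  rw [Int.toNat_natCast] at hin
  have hk1 : k < st.1.length := by omega
  have hk2 : k < st.2.length := by omega
  unfold pvAdd3 pvDerive pvUpd
  simp only [PySem.List.pySetD_natCast, PySem.List.pyGetD_natCast]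
  refine Prod.ext ?_ (Prod.ext ?_ ?_)
  · apply List.ext_getElem
    · simp [h1, h2]
    · intro j hj hj'
      have hkz : k < ((st.2.zip (st.1.map (fun s => pvGAS_COST_BIT * pvBITS_PERMUTATION * s))).map
          (fun p => pvGAS_COST_BIT * pvBITS_USER_ID * p.1 - p.2)).length := by
        simp; omega
      simp only [List.getD_eq_getElem _ _ hkz, List.getD_eq_getElem _ _ hk1,
        List.getD_eq_getElem _ _ hk2, List.getElem_set, List.getElem_map, List.getElem_zip]
      by_cases h : k = j
      · subst h
        simp [pvGAS_COST_BIT, pvBITS_USER_ID, pvBITS_PERMUTATION]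
        ring
      · simp [h]
  · apply List.ext_getElem
    · simp
    · intro j hj hj'
      have hkm : k < (st.1.map (fun s => pvGAS_COST_BIT * pvBITS_PERMUTATION * s)).length := by
        simpa using hk1
      simp only [List.getD_eq_getElem _ _ hkm, List.getD_eq_getElem _ _ hk1,
        List.getElem_set, List.getElem_map]
      by_cases h : k = j
      · subst h
        simp [pvGAS_COST_BIT, pvBITS_PERMUTATION]
        ring
      · simp [h]
  · rfl

-- one key's pair fold commutes with pvDerive: A's three-array accumulation over the
-- (prev, cur) pairs equals B's two-array accumulation over the key's event stream
theorem pvKey_derive (txs : List (List (List (String × Int)))) (v : Int) (n : Nat) :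
    ∀ (zs : List (Int × Int)) (st : List Int × List Int),
      st.1.length = n → st.2.length = n →
      (∀ pc ∈ zs, 0 ≤ pc.2 ∧ pc.2.toNat < n) →
      zs.foldl (pvListStep txs v) (pvDerive st) =
        pvDerive ((((zs.filter (fun pc => decide (pvLenTx txs pc.1 ≠ 0))).map
            (fun pc => (pc.2, pvLenTx txs pc.1, v)))).foldl pvUpd st) := by
  intro zs
  induction zs with
  | nil => intro st _ _ _; rfl
  | cons pc zs ih =>
    intro st h1 h2 hb
    have hpc := hb pc List.mem_cons_self
    by_cases hs : pvLenTx txs pc.1 = 0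
    · rw [List.filter_cons_of_neg (by simp [hs])]
      simp only [List.foldl_cons]
      rw [show pvListStep txs v (pvDerive st) pc = pvDerive st by simp [pvListStep, hs]]
      exact ih st h1 h2 (fun q hq => hb q (List.mem_cons_of_mem _ hq))
    · rw [List.filter_cons_of_pos (by simpa using hs)]
      simp only [List.map_cons, List.foldl_cons]
      rw [show pvListStep txs v (pvDerive st) pc =
            pvDerive (pvUpd st (pc.2, pvLenTx txs pc.1, v)) by
          simp only [pvListStep, if_pos hs]
          exact pvAdd3_derive st n h1 h2 pc.2 hpc.1 hpc.2 (pvLenTx txs pc.1) v]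
      have hl := pvUpd_length st (pc.2, pvLenTx txs pc.1, v)
      exact ih _ (hl.1.trans h1) (hl.2.trans h2) (fun q hq => hb q (List.mem_cons_of_mem _ hq))

-- event accumulation over perms starts from any prefix: the fold is append of per-key events
theorem pvEvents_free (txs : List (List (List (String × Int)))) :
    ∀ (perms : List (String × Int)) (acc0 : List (Int × Int × Int)),
      perms.foldl (fun acc kv => acc ++ pvEventsOfKey txs kv.1 kv.2) acc0 =
        acc0 ++ perms.foldl (fun acc kv => acc ++ pvEventsOfKey txs kv.1 kv.2) [] := by
  intro perms
  induction perms with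
  | nil => intro acc0; simp
  | cons q qs ihq =>
    intro acc0
    simp only [List.foldl_cons]
    rw [ihq (acc0 ++ pvEventsOfKey txs q.1 q.2), ihq ([] ++ pvEventsOfKey txs q.1 q.2)]
    simp

-- pass-2 folds preserve the lengths of both arrays
theorem pvUpd_foldl_length (es : List (Int × Int × Int)) :
    ∀ (st0 : List Int × List Int),
      (es.foldl pvUpd st0).1.length = st0.1.length ∧
      (es.foldl pvUpd st0).2.length = st0.2.length := by
  induction es with
  | nil => intro st0; exact ⟨rfl, rfl⟩
  | cons e es ihe =>
    intro st0
    simp only [List.foldl_cons]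
    have := pvUpd_length st0 e
    exact ⟨(ihe _).1.trans this.1, (ihe _).2.trans this.2⟩

-- the outer loop: A's fold over all keys equals pvDerive of B's pass-2 fold over
-- the concatenated event stream
theorem pvOuter (txs : List (List (List (String × Int)))) :
    ∀ (perms : List (String × Int)) (st : List Int × List Int),
      st.1.length = txs.length + 1 → st.2.length = txs.length + 1 →
      (∀ kv ∈ perms, ∀ j : Nat, j < (pvVals kv.1).length →
        (pvVals kv.1).getD j 0 ≠ 0 → j < txs.length) →
      perms.foldl
          (fun acc kv => ((PySem.List.enumerate (pvVals kv.1) 0).foldl (pvStepA txs kv.2) (0, acc)).2)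
          (pvDerive st) =
        pvDerive ((perms.foldl (fun acc kv => acc ++ pvEventsOfKey txs kv.1 kv.2) []).foldl pvUpd st) := by
  intro perms
  induction perms with
  | nil => intro st _ _ _; rfl
  | cons kv perms ih =>
    intro st h1 h2 h
    simp only [List.foldl_cons]
    rw [pvA_loop, ← pvNz_eq, pvPair_zero,
      pvKey_derive txs kv.2 (txs.length + 1) _ st h1 h2 ?bnd]
    case bnd =>
      intro pc hpc
      exact pvNz_bound txs (pvVals kv.1) (h kv List.mem_cons_self) pc.2
        (List.mem_of_mem_tail (List.of_mem_zip hpc).2)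
    have hkey : (((pvNz (pvVals kv.1)).zip (pvNz (pvVals kv.1)).tail).filter
          (fun pc => decide (pvLenTx txs pc.1 ≠ 0))).map
          (fun pc => (pc.2, pvLenTx txs pc.1, kv.2)) = pvEventsOfKey txs kv.1 kv.2 := by
      simp only [pvEventsOfKey, PySem.List.slice_from_one]
    rw [hkey]
    have hst' := pvUpd_foldl_length (pvEventsOfKey txs kv.1 kv.2) st
    rw [ih _ (hst'.1.trans h1) (hst'.2.trans h2) (fun q hq => h q (List.mem_cons_of_mem _ hq)),
      List.nil_append, pvEvents_free txs perms (pvEventsOfKey txs kv.1 kv.2), List.foldl_append]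

-- ===== VERDICT (by name: the statement is the Claim_ definition above) =====
theorem get_stats_for_reusing_groups_all_data_spec : Claim_equal_get_stats_for_reusing_groups_all_data := by
  intro txs perms ru _ hpre
  unfold Spec_get_stats_for_reusing_groups_all_data
  unfold get_stats_for_reusing_groups_all_data get_stats_for_reusing_groups_all_data_alt
  have hinit : (List.replicate (txs.length + 1) (0 : Int), List.replicate (txs.length + 1) (0 : Int),
      List.replicate (txs.length + 1) (0 : Int)) =
      pvDerive (List.replicate (txs.length + 1) 0, List.replicate (txs.length + 1) 0) := by
    unfold pvDerive
    simp [List.map_replicate, pvGAS_COST_BIT, pvBITS_PERMUTATION, pvBITS_USER_ID]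
  simp only []
  rw [hinit, pvOuter txs perms _ (by simp) (by simp) (fun kv hkv => (hpre kv hkv).2)]
  rfl
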